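-- pv_equiv track=rewrite | github.com/cMarzal/AdventOfCode | 2023/day7/p1.py | hand_strength
-- ===== SOURCE A (Python) =====
-- def hand_strength(hand):
--     dd = dict()
--     j_count = hand.count("J")
--     for char in hand:
--         dd[char] = hand.count(char)
--     dd["J"] = 0
--     srt = sorted(dd.values(), reverse=True)
--     srt[0] += j_count
--     return srt
-- ===== SOURCE B (Python) =====
-- def hand_strength(hand):
--     # Sort the hand and scan consecutive runs: one pass gives every card's
--     # multiplicity; J is the wild card, so its run feeds the best group instead
--     # of standing on its own (its always-present slot counts 0).
--     s = sorted(hand)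
--     counts = [0]  # the wild-card J slot is always present and counts 0
--     j_count = 0
--     i = 0
--     n = len(s)
--     while i < n:
--         j = i
--         while j < n and s[j] == s[i]:
--             j += 1
--         if s[i] == "J":
--             j_count = j - i
--         else:
--             counts.append(j - i)
--         i = j
--     counts.sort(reverse=True)
--     counts[0] += j_count
--     return counts
-- ===== Notes on version B (the rewrite author's own statement) =====
-- stated objective: faster
-- what changed: Replaces the dict of per-char hand.count() scans (quadratic) with one sort of the hand followed by a single run-length scan that collects group sizes, keeping the always-present 0 slot for the wild-card J.
import Mathlib
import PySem

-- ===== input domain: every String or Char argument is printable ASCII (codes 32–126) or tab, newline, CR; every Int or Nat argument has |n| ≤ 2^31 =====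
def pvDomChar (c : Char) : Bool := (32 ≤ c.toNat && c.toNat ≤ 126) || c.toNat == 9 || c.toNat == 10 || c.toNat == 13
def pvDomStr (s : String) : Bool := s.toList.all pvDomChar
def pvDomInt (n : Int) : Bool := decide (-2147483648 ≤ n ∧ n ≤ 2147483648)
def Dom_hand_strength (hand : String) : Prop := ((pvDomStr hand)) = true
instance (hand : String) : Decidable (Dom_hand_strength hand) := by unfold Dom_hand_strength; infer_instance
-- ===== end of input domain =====

-- B replaces A's per-character hand.count() dict with one sort of the hand plus a
-- single run-length scan (objective: faster; return-value equivalence proved below).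


-- ===== PORT A =====
def hand_strength (hand : String) : List Int :=
  let dd : PySem.Dict Char Int := PySem.Dict.empty
  let j_count : Int := (PySem.Str.count hand "J" : Int)
  let dd := hand.toList.foldl
    (fun d char => d.insert char ((PySem.Str.count hand (String.ofList [char]) : Int))) dd
  let dd := dd.insert 'J' 0
  let srt := PySem.List.sorted dd.values (fun x => x) true
  match srt with
  | [] => []          -- unreachable: dd always carries the 'J' key, so srt ≠ []
  | x :: t => (x + j_count) :: t

-- ===== PORT B =====
-- run scan of Source B: the inner `while j < n and s[j] == s[i]` is the takeWhile of the
-- head run, the outer loop's `i = j` is the dropWhile step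
def pvScanRuns : List Char → List Int → Int → List Int × Int
  | [], counts, j_count => (counts, j_count)
  | c :: rest, counts, j_count =>
    let len : Int := ((rest.takeWhile (fun x => x == c)).length : Int) + 1
    let rest' := rest.dropWhile (fun x => x == c)
    if c = 'J' then pvScanRuns rest' counts len
    else pvScanRuns rest' (counts ++ [len]) j_count
termination_by s _ _ => s.length
decreasing_by
  all_goals exact Nat.lt_succ_of_le (List.length_dropWhile_le _ _)

def hand_strength_alt (hand : String) : List Int :=
  let s := PySem.List.sorted hand.toList (fun x => x) false
  let scanned := pvScanRuns s [0] 0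
  let srt := PySem.List.sorted scanned.1 (fun x => x) true
  match srt with
  | [] => []          -- unreachable: counts starts as [0]
  | x :: t => (x + scanned.2) :: t

-- ===== PRECONDITION & SPEC =====
def Spec_hand_strength (hand : String) (out : List Int) : Prop := out = hand_strength_alt hand
instance (hand : String) (out : List Int) : Decidable (Spec_hand_strength hand out) := by unfold Spec_hand_strength; infer_instance

-- ===== CLAIM (what is proved, stated in full; the proofs are below) =====
def Claim_equal_hand_strength : Prop := ∀ (hand : String), Dom_hand_strength hand → Spec_hand_strength hand (hand_strength hand)

-- ===== LEMMAS AND PROOFS =====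

-- str.count with a one-character needle is the plain list count
theorem pv_count_go_singleton (c : Char) :
    ∀ (l : List Char) (fuel acc : Nat), l.length ≤ fuel →
      PySem.Chars.count.go [c] fuel l acc = acc + l.count c := by
  intro l
  induction l with
  | nil =>
    intro fuel acc _
    cases fuel <;> simp [PySem.Chars.count.go]
  | cons h t ih =>
    intro fuel acc hle
    cases fuel with
    | zero => simp at hle
    | succ f =>
      rw [PySem.Chars.count.go]
      by_cases hc : c = h
      · subst hc
        simp only [List.isPrefixOf, Bool.and_true, beq_self_eq_true,
          if_true, List.length_cons, List.length_nil, List.drop_succ_cons, List.drop_zero]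
        rw [ih f (acc+1) (by simpa using hle)]
        simp
        omega
      · have : ([c].isPrefixOf (h :: t)) = false := by
          simp [List.isPrefixOf]
          exact fun hcontra => hc hcontra
        rw [this]
        simp only [Bool.false_eq_true, if_false]
        rw [ih f acc (by simpa using hle)]
        simp [Ne.symm hc]

theorem pv_str_count_singleton (s : String) (c : Char) :
    PySem.Str.count s (String.ofList [c]) = s.toList.count c := by
  rw [PySem.Str.count_eq]
  have h1 : (String.ofList [c]).toList = [c] := by simp
  rw [h1, PySem.Chars.count]
  simp only [List.isEmpty_cons, Bool.false_eq_true, if_false]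
  simpa using pv_count_go_singleton c s.toList s.toList.length 0 le_rfl

-- getD after a fold of inserts whose value depends only on the key
theorem pv_getD_foldl_insert_fun (g : Char → Int) :
    ∀ (l : List Char) (d : PySem.Dict Char Int) (k : Char),
      (l.foldl (fun d x => d.insert x (g x)) d).getD k 0
        = if k ∈ l then g k else d.getD k 0 := by
  intro l
  induction l with
  | nil => intro d k; simp
  | cons x t ih =>
    intro d k
    simp only [List.foldl_cons, ih]
    by_cases hk : k ∈ t
    · simp [hk]
    · by_cases hx : k = x
      · subst hx
        simp [hk]
      · simp [hk, hx, PySem.Dict.getD_insert]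

-- after dropping the head run of a sorted list, every element is strictly larger
theorem pv_dropWhile_gt (c : Char) :
    ∀ (rest : List Char), (∀ x ∈ rest, c ≤ x) → rest.Pairwise (· ≤ ·) →
      ∀ x ∈ rest.dropWhile (fun y => y == c), c < x := by
  intro rest
  induction rest with
  | nil => simp
  | cons d t ihd =>
    intro hle hp
    by_cases hd : d = c
    · subst hd
      rw [List.dropWhile_cons_of_pos (by simp)]
      exact ihd (fun x hx => hle x (by simp [hx])) (List.pairwise_cons.mp hp).2
    · rw [List.dropWhile_cons_of_neg (by simp [hd])]
      intro x hx
      have hcd : c < d := lt_of_le_of_ne (hle d (by simp)) (fun h => hd h.symm)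
      rcases List.mem_cons.mp hx with h | h
      · exact h ▸ hcd
      · exact lt_of_lt_of_le hcd ((List.pairwise_cons.mp hp).1 x h)

-- facts about the head run of a sorted list
theorem pv_run_facts (c : Char) (rest : List Char)
    (hsort : (c :: rest).Pairwise (· ≤ ·)) :
    (∀ x ∈ rest.dropWhile (fun y => y == c), c < x)
    ∧ (List.count c (c :: rest) = (rest.takeWhile (fun y => y == c)).length + 1)
    ∧ (∀ d, d ≠ c → List.count d (c :: rest) = List.count d (rest.dropWhile (fun y => y == c)))
    ∧ (rest.dropWhile (fun y => y == c)).Pairwise (· ≤ ·)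
    ∧ (∀ x, x ∈ (c :: rest) ↔ x = c ∨ x ∈ rest.dropWhile (fun y => y == c)) := by
  obtain ⟨hle, hsr⟩ := List.pairwise_cons.mp hsort
  have hgt := pv_dropWhile_gt c rest hle hsr
  have hsplit : rest.takeWhile (fun y => y == c) ++ rest.dropWhile (fun y => y == c) = rest :=
    List.takeWhile_append_dropWhile
  have hrun : ∀ x ∈ rest.takeWhile (fun y => y == c), x = c := by
    intro x hx
    simpa using List.mem_takeWhile_imp hx
  have hcnot : c ∉ rest.dropWhile (fun y => y == c) := fun h => lt_irrefl c (hgt c h)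
  refine ⟨hgt, ?_, ?_, hsr.sublist (List.dropWhile_sublist _), ?_⟩
  · have hc := (congrArg (List.count c) hsplit).symm
    rw [List.count_append] at hc
    rw [List.count_cons_self, hc]
    have h1 : List.count c (rest.takeWhile (fun y => y == c))
        = (rest.takeWhile (fun y => y == c)).length :=
      List.count_eq_length.mpr (fun b hb => (hrun b hb).symm)
    have h2 : List.count c (rest.dropWhile (fun y => y == c)) = 0 :=
      List.count_eq_zero.mpr hcnot
    omega
  · intro d hd
    have hc := (congrArg (List.count d) hsplit).symm
    rw [List.count_append] at hc
    rw [List.count_cons_of_ne (Ne.symm hd), hc]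
    have h1 : List.count d (rest.takeWhile (fun y => y == c)) = 0 :=
      List.count_eq_zero.mpr (fun h => hd (hrun d h))
    omega
  · intro x
    constructor
    · intro hx
      rcases List.mem_cons.mp hx with h | h
      · exact Or.inl h
      · rw [← hsplit] at h
        rcases List.mem_append.mp h with h | h
        · exact Or.inl (hrun x h)
        · exact Or.inr h
    · intro hx
      rcases hx with h | h
      · simp [h]
      · have : x ∈ rest := by
          rw [← hsplit]; exact List.mem_append.mpr (Or.inr h)
        exact List.mem_cons.mpr (Or.inr this)

-- the run scan on a sorted list: counts become the per-distinct-char multiplicities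
-- (up to permutation), j_count becomes the multiplicity of 'J'
theorem pv_scan_spec :
    ∀ (s : List Char) (counts : List Int) (j : Int), s.Pairwise (· ≤ ·) →
      ∀ (K : List Char), K.Nodup → (∀ x, x ∈ K ↔ x ∈ s) →
          ((pvScanRuns s counts j).1).Perm
              (counts ++ (K.filter (fun c => c != 'J')).map (fun c => (s.count c : Int)))
          ∧ (pvScanRuns s counts j).2 = (if 'J' ∈ s then (s.count 'J' : Int) else j) := by
  intro s counts j
  induction s, counts, j using pvScanRuns.induct with
  | case1 counts j =>
    intro _ K _ hK
    have : K = [] := by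
      cases K with
      | nil => rfl
      | cons a t => exact absurd ((hK a).mp (by simp)) (by simp)
    subst this
    simp [pvScanRuns]
  | case2 rest counts j len rest' ih =>
    intro hsort K hnd hK
    obtain ⟨hgt, hcnt, hcne, hs', hmem⟩ := pv_run_facts 'J' rest hsort
    have hJnotin : 'J' ∉ rest.dropWhile (fun y => y == 'J') :=
      fun h => lt_irrefl 'J' (hgt 'J' h)
    have hcK : 'J' ∈ K := (hK 'J').mpr (by simp)
    have hnd' : (K.erase 'J').Nodup := hnd.erase 'J'
    have hK' : ∀ x, x ∈ K.erase 'J' ↔ x ∈ rest.dropWhile (fun y => y == 'J') := by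
      intro x
      rw [hnd.mem_erase_iff]
      constructor
      · rintro ⟨hne, hxK⟩
        rcases (hmem x).mp ((hK x).mp hxK) with h | h
        · exact absurd h hne
        · exact h
      · intro hx
        exact ⟨fun h => hJnotin (h ▸ hx), (hK x).mpr ((hmem x).mpr (Or.inr hx))⟩
    obtain ⟨ihp, ihj⟩ := ih hs' (K.erase 'J') hnd' hK'
    have hfilter : (K.filter (fun c => c != 'J')).Perm
        ((K.erase 'J').filter (fun c => c != 'J')) := by
      have h1 := (List.perm_cons_erase hcK).filter (fun c => c != 'J')
      simpa using h1
    have hmapeq : ((K.erase 'J').filter (fun c => c != 'J')).map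
          (fun c => (List.count c ('J' :: rest) : Int))
        = ((K.erase 'J').filter (fun c => c != 'J')).map
          (fun c => (List.count c (rest.dropWhile (fun y => y == 'J')) : Int)) := by
      apply List.map_congr_left
      intro a ha
      have hane : a ≠ 'J' := by simpa using (List.mem_filter.mp ha).2
      rw [hcne a hane]
    constructor
    · rw [pvScanRuns]
      simp only [if_true]
      refine ihp.trans (List.Perm.append_left counts ?_)
      rw [← hmapeq]
      exact ((hfilter.map _).symm)
    · rw [pvScanRuns]
      simp only [if_true]
      rw [ihj, if_neg hJnotin, if_pos (by simp), hcnt]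
      push_cast
      ring
  | case3 c rest counts j len rest' hne ih =>
    intro hsort K hnd hK
    obtain ⟨hgt, hcnt, hcne, hs', hmem⟩ := pv_run_facts c rest hsort
    have hcnotin : c ∉ rest.dropWhile (fun y => y == c) :=
      fun h => lt_irrefl c (hgt c h)
    have hcK : c ∈ K := (hK c).mpr (by simp)
    have hnd' : (K.erase c).Nodup := hnd.erase c
    have hK' : ∀ x, x ∈ K.erase c ↔ x ∈ rest.dropWhile (fun y => y == c) := by
      intro x
      rw [hnd.mem_erase_iff]
      constructor
      · rintro ⟨hxne, hxK⟩
        rcases (hmem x).mp ((hK x).mp hxK) with h | h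
        · exact absurd h hxne
        · exact h
      · intro hx
        exact ⟨fun h => hcnotin (h ▸ hx), (hK x).mpr ((hmem x).mpr (Or.inr hx))⟩
    obtain ⟨ihp, ihj⟩ := ih hs' (K.erase c) hnd' hK'
    have hfilter : (K.filter (fun x => x != 'J')).Perm
        (c :: (K.erase c).filter (fun x => x != 'J')) := by
      have h1 := (List.perm_cons_erase hcK).filter (fun x => x != 'J')
      rw [List.filter_cons_of_pos (by simpa using hne)] at h1
      exact h1
    have hmapeq : ((K.erase c).filter (fun x => x != 'J')).map
          (fun x => (List.count x (c :: rest) : Int))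
        = ((K.erase c).filter (fun x => x != 'J')).map
          (fun x => (List.count x (rest.dropWhile (fun y => y == c)) : Int)) := by
      apply List.map_congr_left
      intro a ha
      have haK : a ∈ K.erase c := (List.mem_filter.mp ha).1
      have hane : a ≠ c := ((hnd.mem_erase_iff).mp haK).1
      rw [hcne a hane]
    have hJiff : ('J' ∈ (c :: rest)) ↔ ('J' ∈ rest.dropWhile (fun y => y == c)) := by
      rw [hmem 'J']
      constructor
      · rintro (h | h)
        · exact absurd h.symm hne
        · exact h
      · exact Or.inr
    constructor
    · rw [pvScanRuns]
      simp only [if_neg hne]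
      refine ihp.trans ?_
      have hassoc : (counts ++ [((rest.takeWhile (fun x => x == c)).length : Int) + 1])
            ++ ((K.erase c).filter (fun x => x != 'J')).map
              (fun x => (List.count x (rest.dropWhile (fun y => y == c)) : Int))
          = counts ++ ((((rest.takeWhile (fun x => x == c)).length : Int) + 1)
            :: ((K.erase c).filter (fun x => x != 'J')).map
              (fun x => (List.count x (rest.dropWhile (fun y => y == c)) : Int))) := by
        simp
      rw [hassoc]
      refine List.Perm.append_left counts ?_
      have hhead : (((rest.takeWhile (fun x => x == c)).length : Int) + 1)
          = (List.count c (c :: rest) : Int) := by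
        rw [hcnt]; push_cast; ring
      rw [hhead, ← hmapeq]
      have := (hfilter.map (fun x => (List.count x (c :: rest) : Int))).symm
      simpa using this
    · rw [pvScanRuns]
      simp only [if_neg hne]
      rw [ihj]
      by_cases hJ : 'J' ∈ (c :: rest)
      · rw [if_pos (hJiff.mp hJ), if_pos hJ, hcne 'J' (fun h => hne h.symm)]
      · rw [if_neg (fun h => hJ (hJiff.mpr h)), if_neg hJ]

-- A's dict values: one 0 (the J slot) plus the count of every distinct non-J char
theorem pv_values_perm (xs : List Char) :
    ((xs.foldl (fun d char => d.insert char ((xs.count char : Int)))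
        (PySem.Dict.empty)).insert 'J' 0).values.Perm
      (0 :: ((PySem.Set.ofList xs).filter (fun c => c != 'J')).map
        (fun c => (xs.count c : Int))) := by
  set d1 := xs.foldl (fun d char => d.insert char ((xs.count char : Int)))
      (PySem.Dict.empty) with hd1
  have hkeys1 : d1.keys = PySem.Set.ofList xs := by
    rw [hd1, PySem.Dict.keys_foldl_insert xs (fun _ x => ((xs.count x : Int))),
      PySem.Dict.keys_empty, PySem.Set.update_nil_left]
  have hnd1 : d1.keys.Nodup := by
    rw [hkeys1]; exact PySem.Set.nodup_ofList xs
  set d2 := d1.insert 'J' 0 with hd2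
  have hg : ∀ k, d1.getD k 0 = if k ∈ xs then (xs.count k : Int) else 0 := by
    intro k
    rw [hd1, pv_getD_foldl_insert_fun]
    simp
  have hg2 : ∀ k, d2.getD k 0 = if k = 'J' then 0 else if k ∈ xs then (xs.count k : Int) else 0 := by
    intro k
    rw [hd2, PySem.Dict.getD_insert, hg]
  by_cases hJ : 'J' ∈ d1.keys
  · have hkeys2 : d2.keys = d1.keys := by
      apply PySem.Dict.keys_insert_of_contains
      rw [PySem.Dict.contains_eq_decide_mem_keys]
      simpa using hJ
    have hnd2 : d2.keys.Nodup := by rw [hkeys2]; exact hnd1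
    rw [PySem.Dict.values_eq_map_keys d2 hnd2 0, hkeys2]
    have hKperm : d1.keys.Perm ('J' :: d1.keys.erase 'J') := List.perm_cons_erase hJ
    refine (hKperm.map _).trans ?_
    rw [List.map_cons]
    have hh : d2.getD 'J' 0 = 0 := by rw [hg2]; simp
    rw [hh]
    refine List.Perm.cons 0 ?_
    have herase : d1.keys.erase 'J' = d1.keys.filter (fun x => x != 'J') :=
      hnd1.erase_eq_filter 'J'
    rw [herase, hkeys1]
    apply List.Perm.of_eq
    apply List.map_congr_left
    intro a ha
    obtain ⟨haK, hane⟩ := List.mem_filter.mp ha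
    have haxs : a ∈ xs := (PySem.Set.mem_ofList xs a).mp haK
    rw [hg2]
    simp only [if_neg (by simpa using hane), if_pos haxs]
  · have hkeys2 : d2.keys = d1.keys ++ ['J'] := by
      apply PySem.Dict.keys_insert_of_not_contains
      rw [PySem.Dict.contains_eq_decide_mem_keys]
      simpa using hJ
    have hnd2 : d2.keys.Nodup := by
      rw [hkeys2]
      exact List.Nodup.append hnd1 (List.nodup_singleton _) (by simpa using hJ)
    rw [PySem.Dict.values_eq_map_keys d2 hnd2 0, hkeys2, List.map_append, List.map_cons]
    have hh : d2.getD 'J' 0 = 0 := by rw [hg2]; simp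
    rw [hh]
    have hfilter : (PySem.Set.ofList xs).filter (fun c => c != 'J') = PySem.Set.ofList xs := by
      apply List.filter_eq_self.mpr
      intro a ha
      have : a ∈ xs := (PySem.Set.mem_ofList xs a).mp ha
      have hane : a ≠ 'J' := by
        intro h; subst h
        exact hJ (by rw [hkeys1]; exact (PySem.Set.mem_ofList xs 'J').mpr this)
      simpa using hane
    rw [hfilter]
    have hmap : (d1.keys).map (fun k => d2.getD k 0)
        = (PySem.Set.ofList xs).map (fun c => (xs.count c : Int)) := by
      rw [hkeys1]
      apply List.map_congr_left
      intro a ha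
      have haxs : a ∈ xs := (PySem.Set.mem_ofList xs a).mp ha
      have hane : a ≠ 'J' := by
        intro h; subst h
        exact hJ (by rw [hkeys1]; exact ha)
      rw [hg2, if_neg hane, if_pos haxs]
    rw [hmap]
    simp [List.perm_append_singleton]

theorem pv_hand_strength_eq (hand : String) : hand_strength hand = hand_strength_alt hand := by
  have hxs : ∀ (c : Char), PySem.Str.count hand (String.ofList [c]) = hand.toList.count c :=
    fun c => pv_str_count_singleton hand c
  set xs := hand.toList with hxsdef
  have hfoldeq : (fun (d : PySem.Dict Char Int) char =>
        d.insert char ((PySem.Str.count hand (String.ofList [char]) : Int)))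
      = (fun (d : PySem.Dict Char Int) char => d.insert char ((xs.count char : Int))) := by
    funext d char
    rw [hxs char]
  have hA := pv_values_perm xs
  set s := PySem.List.sorted xs (fun x => x) false with hsdef
  have hpair : s.Pairwise (· ≤ ·) := PySem.List.sorted_pairwise xs (fun x => x)
  have hsp : s.Perm xs := PySem.List.sorted_perm xs (fun x => x) false
  have hmemK : ∀ x, x ∈ PySem.Set.ofList xs ↔ x ∈ s := by
    intro x
    rw [PySem.Set.mem_ofList, hsp.mem_iff]
  obtain ⟨hp1, hp2⟩ := pv_scan_spec s [0] 0 hpair (PySem.Set.ofList xs)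
    (PySem.Set.nodup_ofList xs) hmemK
  have hcnt : ∀ c : Char, List.count c s = List.count c xs := fun c => hsp.count_eq c
  have hp1' : ((pvScanRuns s [0] 0).1).Perm
      (0 :: ((PySem.Set.ofList xs).filter (fun c => c != 'J')).map
        (fun c => (xs.count c : Int))) := by
    refine hp1.trans ?_
    apply List.Perm.of_eq
    simp only [List.singleton_append, List.cons.injEq, true_and]
    apply List.map_congr_left
    intro a _
    rw [hcnt a]
  have hperm : ((pvScanRuns s [0] 0).1).Perm
      ((xs.foldl (fun d char => d.insert char ((xs.count char : Int)))
        (PySem.Dict.empty)).insert 'J' 0).values := hp1'.trans hA.symm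
  have hsorted_eq :
      PySem.List.sorted ((xs.foldl (fun d char => d.insert char ((xs.count char : Int)))
          (PySem.Dict.empty)).insert 'J' 0).values (fun x => x) true
        = PySem.List.sorted ((pvScanRuns s [0] 0).1) (fun x => x) true := by
    apply List.Perm.eq_of_pairwise (fun a b _ _ h1 h2 => le_antisymm h2 h1)
      (PySem.List.sorted_pairwise_rev _ _) (PySem.List.sorted_pairwise_rev _ _)
    exact (PySem.List.sorted_perm _ _ _).trans
      (hperm.symm.trans (PySem.List.sorted_perm _ _ _).symm)
  have hj : (PySem.Str.count hand "J" : Int) = (pvScanRuns s [0] 0).2 := by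
    rw [hp2]
    have h1 : (PySem.Str.count hand "J" : Int) = (xs.count 'J' : Int) := by
      have : ("J" : String) = String.ofList ['J'] := rfl
      rw [this, hxs 'J']
    by_cases hmem : 'J' ∈ s
    · rw [if_pos hmem, h1, hcnt 'J']
    · rw [if_neg hmem, h1]
      have : 'J' ∉ xs := fun h => hmem (hsp.mem_iff.mpr h)
      simp [List.count_eq_zero.mpr this]
  simp only [hand_strength, hand_strength_alt, hfoldeq, ← hxsdef, ← hsdef, hsorted_eq, hj]

-- ===== VERDICT (by name: the statement is the Claim_ definition above) =====
theorem hand_strength_spec : Claim_equal_hand_strength := by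
  intro hand _
  unfold Spec_hand_strength
  exact pv_hand_strength_eq hand
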